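-- pv_equiv track=rewrite | github.com/google/jaxite | jaxite_ec/util.py | rns_precompute
-- ===== SOURCE A (Python) =====
-- def total_modulus(moduli):
--   modulus = 1  # Compute the big modulus
--   for m in moduli:
--     modulus *= m
--   return modulus
--
-- def rns_precompute(moduli):
--   modulus = total_modulus(moduli)
--   precomputed = []
--   for m in moduli:
--     rest = modulus // m  # 0 mod all the other moduli
--     inverse = pow(rest % m, -1, m)  # factor to make 1 mod this moduli
--     icrt_val = (rest * inverse) % modulus  # combine
--     precomputed.append(icrt_val)
--   return precomputed
-- ===== SOURCE B (Python) =====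
-- def rns_precompute(moduli):
--   # prefix[i] = product of moduli[:i]; suffix[i] = product of moduli[i:]
--   prefix = []
--   p = 1
--   for m in moduli:
--     prefix.append(p)
--     p *= m
--   modulus = p
--   suffix = [1]
--   for m in reversed(moduli):
--     suffix.append(m * suffix[-1])
--   suffix.reverse()
--   out = []
--   for m, pre, suf in zip(moduli, prefix, suffix[1:]):
--     rest = pre * suf  # product of all the other moduli
--     inverse = pow(rest % m, -1, m)
--     out.append((rest * inverse) % modulus)
--   return out
-- ===== Notes on version B (the rewrite author's own statement) =====
-- stated objective: alternative
-- what changed: rest (the product of all the other moduli) is obtained from prefix- and suffix-product arrays built in two passes and combined by a zip, instead of dividing the total modulus by each modulus inside the loop; no division is performed.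
import Mathlib
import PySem

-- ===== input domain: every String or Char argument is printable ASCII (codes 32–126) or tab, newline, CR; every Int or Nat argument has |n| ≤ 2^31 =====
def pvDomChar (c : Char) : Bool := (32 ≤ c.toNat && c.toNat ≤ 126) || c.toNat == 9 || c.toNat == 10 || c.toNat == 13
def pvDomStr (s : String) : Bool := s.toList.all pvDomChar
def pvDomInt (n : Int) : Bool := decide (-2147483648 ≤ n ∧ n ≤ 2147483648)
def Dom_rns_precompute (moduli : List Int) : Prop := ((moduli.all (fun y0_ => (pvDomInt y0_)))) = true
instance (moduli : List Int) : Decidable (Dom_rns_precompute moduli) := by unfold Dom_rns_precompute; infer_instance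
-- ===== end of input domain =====

-- B computes each `rest` (product of the other moduli) from prefix/suffix product arrays
-- combined by a zip, instead of A's division of the total modulus; same cost, no division.

-- Shared helper for Python's pow(a, -1, m) (both A and B call this builtin):
-- exact whenever m ≠ 0 and gcd(a, m) = 1 (then the result is the unique inverse in the
-- residue range of Python's `% m`, here PySem.Int.mod (Int.gcdA a m) m since
-- a * gcdA a m ≡ gcd a m = 1 [mod m]); Python raises ValueError otherwise, which
-- Pre_rns_precompute excludes (the `else 0` branch is never reached inside Pre_).
def pyInvModD (a m : Int) : Int :=
  if Int.gcd a m = 1 then PySem.Int.mod (Int.gcdA a m) m else 0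

-- ===== PORT A =====
def total_modulus (moduli : List Int) : Int :=
  moduli.foldl (fun modulus m => modulus * m) 1

def rns_precompute (moduli : List Int) : List Int :=
  let modulus := total_modulus moduli
  moduli.foldl (fun precomputed m =>
    let rest := PySem.Int.floordiv modulus m
    let inverse := pyInvModD (PySem.Int.mod rest m) m
    let icrt_val := PySem.Int.mod (rest * inverse) modulus
    precomputed ++ [icrt_val]) []

-- ===== PORT B =====
def rns_precompute_alt (moduli : List Int) : List Int :=
  let st := moduli.foldl (fun (st : List Int × Int) m => (st.1 ++ [st.2], st.2 * m)) ([], 1)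
  let pref := st.1
  let modulus := st.2
  -- Python appends m * suffix[-1] while walking reversed(moduli) and reverses once at the
  -- end; consing onto the front of the accumulator builds the same re-reversed list.
  let suffix := moduli.reverse.foldl (fun acc m => (m * acc.headI) :: acc) [1]
  (moduli.zip (pref.zip (suffix.drop 1))).map (fun x =>
    let rest := x.2.1 * x.2.2
    let inverse := pyInvModD (PySem.Int.mod rest x.1) x.1
    PySem.Int.mod (rest * inverse) modulus)

-- ===== PRECONDITION & SPEC =====
-- Exactly where Python's A returns: a zero modulus makes pow(_, -1, 0) raise ValueError,
-- and a non-coprime pair makes `rest % m` non-invertible mod m (ValueError as well).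
def Pre_rns_precompute (moduli : List Int) : Prop :=
  (∀ m ∈ moduli, m ≠ 0) ∧ List.Pairwise (fun a b => Int.gcd a b = 1) moduli
instance (moduli : List Int) : Decidable (Pre_rns_precompute moduli) := by
  unfold Pre_rns_precompute; infer_instance

def pvWitness_rns_precompute : List Int := [3, 5, 7]

def Spec_rns_precompute (moduli : List Int) (out : List Int) : Prop := out = rns_precompute_alt moduli
instance (moduli : List Int) (out : List Int) : Decidable (Spec_rns_precompute moduli out) := by unfold Spec_rns_precompute; infer_instance

-- ===== CLAIM (what is proved, stated in full; the proofs are below) =====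
def Claim_equal_rns_precompute : Prop := ∀ (moduli : List Int), Dom_rns_precompute moduli → Pre_rns_precompute moduli → Spec_rns_precompute moduli (rns_precompute moduli)

-- ===== LEMMAS AND PROOFS =====

-- Common reference: entry for modulus m with running prefix product c uses rest = c * r.prod.
def refList (P : Int) : List Int → Int → List Int
  | [], _ => []
  | m :: r, c =>
    (PySem.Int.mod ((c * r.prod) * pyInvModD (PySem.Int.mod (c * r.prod) m) m) P)
      :: refList P r (c * m)

-- prefix list produced by B's first loop, relative to a running product c
def preL (c : Int) : List Int → List Int
  | [] => []
  | m :: r => c :: preL (c * m) r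

theorem foldl_mul_eq (l : List Int) : ∀ (a : Int), l.foldl (fun x y => x * y) a = a * l.prod := by
  induction l with
  | nil => intro a; simp
  | cons m r ih => intro a; simp [List.foldl_cons, ih, List.prod_cons]; ring

theorem total_modulus_eq (l : List Int) : total_modulus l = l.prod := by
  simpa using foldl_mul_eq l 1

theorem floordiv_mul_cancel (q m : Int) (hm : m ≠ 0) : PySem.Int.floordiv (q * m) m = q := by
  have h := PySem.Int.floordiv_mul_add_mod (q * m) m
  have hz : PySem.Int.mod (q * m) m = 0 :=
    (PySem.Int.mod_eq_zero_iff_dvd _ _).2 ⟨q, by ring⟩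
  rw [hz, add_zero] at h
  exact mul_right_cancel₀ hm h

-- A's loop, as a map, equals refList when P = c * l.prod and no modulus is zero.
theorem A_core (P : Int) (l : List Int) : ∀ (c : Int), (∀ m ∈ l, m ≠ 0) → P = c * l.prod →
    l.map (fun m =>
      PySem.Int.mod (PySem.Int.floordiv P m *
        pyInvModD (PySem.Int.mod (PySem.Int.floordiv P m) m) m) P) = refList P l c := by
  induction l with
  | nil => intro c _ _; simp [refList]
  | cons m r ih =>
    intro c hnz hP
    have hm : m ≠ 0 := hnz m (List.mem_cons_self ..)
    have hdiv : PySem.Int.floordiv P m = c * r.prod := by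
      have : P = (c * r.prod) * m := by rw [hP, List.prod_cons]; ring
      rw [this, floordiv_mul_cancel _ _ hm]
    simp only [List.map_cons, refList, hdiv]
    refine congrArg _ ?_
    exact ih (c * m) (fun x hx => hnz x (List.mem_cons_of_mem _ hx))
      (by rw [hP, List.prod_cons]; ring)

theorem prefix_spec (l : List Int) :
    ∀ (acc : List Int) (c : Int),
      l.foldl (fun (st : List Int × Int) m => (st.1 ++ [st.2], st.2 * m)) (acc, c)
        = (acc ++ preL c l, c * l.prod) := by
  induction l with
  | nil => intro acc c; simp [preL]
  | cons m r ih =>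
    intro acc c
    rw [List.foldl_cons]
    simp only []
    rw [ih (acc ++ [c]) (c * m)]
    simp [preL, List.prod_cons, List.append_assoc, mul_assoc]

def sufFold (l : List Int) : List Int :=
  l.reverse.foldl (fun acc m => (m * acc.headI) :: acc) [1]

theorem sufFold_cons (m : Int) (r : List Int) :
    sufFold (m :: r) = (m * (sufFold r).headI) :: sufFold r := by
  simp [sufFold, List.reverse_cons, List.foldl_append]

theorem sufFold_headI (l : List Int) : (sufFold l).headI = l.prod := by
  induction l with
  | nil => simp [sufFold]
  | cons m r ih => rw [sufFold_cons, List.prod_cons]; simp [ih]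

-- B's zip-map equals refList, unconditionally.
theorem B_core (P : Int) (l : List Int) : ∀ (c : Int),
    (l.zip ((preL c l).zip ((sufFold l).drop 1))).map (fun x =>
      PySem.Int.mod ((x.2.1 * x.2.2) *
        pyInvModD (PySem.Int.mod (x.2.1 * x.2.2) x.1) x.1) P) = refList P l c := by
  induction l with
  | nil => intro c; simp [refList]
  | cons m r ih =>
    intro c
    rw [sufFold_cons]
    simp only [preL, List.drop_succ_cons, List.drop_zero]
    cases hr : sufFold r with
    | nil =>
      exfalso
      have : sufFold r ≠ [] := by
        cases r with
        | nil => simp [sufFold]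
        | cons a s => rw [sufFold_cons]; simp
      exact this hr
    | cons s0 stail =>
      have h0 : s0 = r.prod := by
        have := sufFold_headI r; rw [hr] at this; simpa using this
      simp only [List.zip_cons_cons, List.map_cons, refList, h0]
      refine congrArg _ ?_
      have := ih (c * m)
      rw [hr] at this
      simpa [List.drop_one] using this

theorem A_eq_ref (l : List Int) (h : ∀ m ∈ l, m ≠ 0) :
    rns_precompute l = refList l.prod l 1 := by
  unfold rns_precompute
  rw [total_modulus_eq]
  rw [PySem.List.foldl_append_singleton_eq_map]
  exact A_core l.prod l 1 h (by ring)

theorem B_eq_ref (l : List Int) : rns_precompute_alt l = refList l.prod l 1 := by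
  unfold rns_precompute_alt
  rw [prefix_spec l [] 1]
  simp only [List.nil_append, one_mul]
  exact B_core l.prod l 1

-- ===== VERDICT (by name: the statement is the Claim_ definition above) =====
theorem rns_precompute_spec : Claim_equal_rns_precompute := by
  intro moduli _ hpre
  unfold Spec_rns_precompute
  rw [A_eq_ref moduli hpre.1, B_eq_ref moduli]
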